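-- pv_equiv track=rewrite | github.com/samodurOFF/Python_START | task_1.py | find
-- ===== SOURCE A (Python) =====
-- def find(exp, serch_operand):
--     ind_start = 0
--     ind_finish = 0
--     ind_oper = 0
--     operands_full = ['*', '/', '-', '+']
--     operands = ['*', '/', '-', '+']
--     for op in serch_operand:
--         operands.remove(op)
--     found = False
--     for i, sim in enumerate(exp):
--         if i == 0 and sim == '-':
--             continue
--         if not found and sim in operands:
--             ind_start = i + 1
--         elif found and sim in operands_full:
--             ind_finish = i - 1
--             return ind_start, ind_finish, ind_oper
--         elif sim in serch_operand:
--             found = True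
--             ind_oper = i
--             ind_finish = len(exp) - 1
--     return ind_start, ind_finish, ind_oper
-- ===== SOURCE B (Python) =====
-- def find(exp, serch_operand):
--     full = ['*', '/', '-', '+']
--     others = list(full)
--     for op in serch_operand:
--         others.remove(op)
--     n = len(exp)
--     pairs = list(enumerate(exp))
--     ind_oper = None
--     for i, c in pairs:
--         if c in serch_operand and not (i == 0 and c == '-'):
--             ind_oper = i
--             break
--     limit = n if ind_oper is None else ind_oper
--     ind_start = 0
--     for i, c in reversed(pairs):
--         if i < limit and c in others and not (i == 0 and c == '-'):
--             ind_start = i + 1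
--             break
--     if ind_oper is None:
--         return ind_start, 0, 0
--     ind_finish = n - 1
--     for i, c in pairs:
--         if i > ind_oper and c in full:
--             ind_finish = i - 1
--             break
--     return ind_start, ind_finish, ind_oper
-- ===== Notes on version B (the rewrite author's own statement) =====
-- stated objective: alternative
-- what changed: A threads ind_start/ind_oper/found flags through one stateful scan with an early return; B decomposes the task into three independent scans: find the searched operator's index first, then a backward scan (over the reversed pairs) for the start boundary and a forward scan for the finish boundary.
import Mathlib
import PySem

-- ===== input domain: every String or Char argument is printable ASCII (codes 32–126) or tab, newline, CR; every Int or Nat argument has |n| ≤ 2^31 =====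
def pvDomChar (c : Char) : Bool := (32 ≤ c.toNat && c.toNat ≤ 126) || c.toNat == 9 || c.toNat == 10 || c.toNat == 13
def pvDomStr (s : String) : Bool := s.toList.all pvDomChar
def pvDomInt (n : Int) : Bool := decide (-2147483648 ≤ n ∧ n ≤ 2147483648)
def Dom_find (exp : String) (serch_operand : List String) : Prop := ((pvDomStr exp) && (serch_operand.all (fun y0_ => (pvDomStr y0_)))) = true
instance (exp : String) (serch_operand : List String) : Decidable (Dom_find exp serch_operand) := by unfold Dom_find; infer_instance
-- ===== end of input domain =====

-- B replaces A's single stateful scan (flags ind_start/found threaded through one loop with an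
-- early return) by three independent scans: find the searched operator first, then one backward
-- scan for the start boundary and one forward scan for the finish boundary (objective: alternative).

-- ===== PORT A =====
-- for op in serch_operand: lst.remove(op)  (none = ValueError, excluded by Pre_);
-- both Pythons derive their complement list this way, so both ports use this helper
def removeAllA : List String → List String → Option (List String)
  | ops, [] => some ops
  | ops, x :: rest =>
    match PySem.List.remove? ops x with
    | none => none
    | some ops' => removeAllA ops' rest

-- the 'for i, sim in enumerate(exp)' loop with its early return
def loopA (n : Int) (search operands full : List String) :
    List (Int × Char) → Int → Int → Int → Bool → Int × Int × Int
  | [], st, fin, op, _ => (st, fin, op)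
  | (i, c) :: rest, st, fin, op, found =>
    if i == 0 && c == '-' then loopA n search operands full rest st fin op found
    else if !found && operands.contains (String.singleton c) then
      loopA n search operands full rest (i + 1) fin op found
    else if found && full.contains (String.singleton c) then (st, i - 1, op)
    else if search.contains (String.singleton c) then
      loopA n search operands full rest st (n - 1) i true
    else loopA n search operands full rest st fin op found

def find (exp : String) (serch_operand : List String) : Int × Int × Int :=
  let full := ["*", "/", "-", "+"]
  match removeAllA full serch_operand with
  | none => (0, 0, 0)  -- Python raises ValueError here; excluded by Pre_find
  | some operands =>
      loopA (PySem.Str.len exp) serch_operand operands full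
        (PySem.List.enumerate exp.toList 0) 0 0 0 false

-- ===== PORT B =====
-- first index holding a searched operator (skipping a leading '-'), else none
def scanOperB (search : List String) : List (Int × Char) → Option Int
  | [] => none
  | (i, c) :: rest =>
    if search.contains (String.singleton c) && !(i == 0 && c == '-') then some i
    else scanOperB search rest

-- backward scan (over the reversed pairs) for the start boundary, below limit `lim`
def backScanB (others : List String) (lim : Int) : List (Int × Char) → Int
  | [] => 0
  | (i, c) :: rest =>
    if decide (i < lim) && others.contains (String.singleton c) && !(i == 0 && c == '-') then i + 1
    else backScanB others lim rest

-- forward scan for the finish boundary, above index k; default d = n - 1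
def fwdScanB (full : List String) (k d : Int) : List (Int × Char) → Int
  | [] => d
  | (i, c) :: rest =>
    if decide (k < i) && full.contains (String.singleton c) then i - 1
    else fwdScanB full k d rest

def find_alt (exp : String) (serch_operand : List String) : Int × Int × Int :=
  let full := ["*", "/", "-", "+"]
  match removeAllA full serch_operand with
  | none => (0, 0, 0)  -- Python raises ValueError here; excluded by Pre_find
  | some others =>
    let n := PySem.Str.len exp
    let pairs := PySem.List.enumerate exp.toList 0
    match scanOperB serch_operand pairs with
    | none => (backScanB others n pairs.reverse, 0, 0)
    | some k => (backScanB others k pairs.reverse, fwdScanB full k (n - 1) pairs, k)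

-- ===== PRECONDITION & SPEC =====
-- Pre_ excludes exactly the inputs where A's 'operands.remove(op)' raises ValueError:
-- serch_operand must list distinct members of the four operators.
def Pre_find (exp : String) (serch_operand : List String) : Prop :=
  serch_operand.Nodup ∧ ∀ s ∈ serch_operand, s ∈ ["*", "/", "-", "+"]
instance (exp : String) (serch_operand : List String) : Decidable (Pre_find exp serch_operand) := by unfold Pre_find; infer_instance
def pvWitness_find : String × List String := ("2*3+4", ["+"])

def Spec_find (exp : String) (serch_operand : List String) (out : Int × Int × Int) : Prop := out = find_alt exp serch_operand
instance (exp : String) (serch_operand : List String) (out : Int × Int × Int) : Decidable (Spec_find exp serch_operand out) := by unfold Spec_find; infer_instance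

-- ===== CLAIM (what is proved, stated in full; the proofs are below) =====
def Claim_equal_find : Prop := ∀ (exp : String) (serch_operand : List String), Dom_find exp serch_operand → Pre_find exp serch_operand → Spec_find exp serch_operand (find exp serch_operand)
-- ===== LEMMAS AND PROOFS =====

-- proof-side variant of backScanB with a general default
def backAuxD (others : List String) (lim : Int) (d : Int) : List (Int × Char) → Int
  | [] => d
  | (i, c) :: rest =>
    if decide (i < lim) && others.contains (String.singleton c) && !(i == 0 && c == '-') then i + 1
    else backAuxD others lim d rest

lemma contains_of_mem {l : List String} {s : String} (h : s ∈ l) : l.contains s = true := by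
  exact (List.contains_iff_mem).2 h

lemma backScanB_eq_auxD (o : List String) (lim : Int) (ps : List (Int × Char)) :
    backScanB o lim ps = backAuxD o lim 0 ps := by
  induction ps with
  | nil => rfl
  | cons p rest ih => obtain ⟨i, c⟩ := p; simp only [backScanB, backAuxD, ih]

lemma backAuxD_append (o : List String) (lim d : Int) (xs ys : List (Int × Char)) :
    backAuxD o lim d (xs ++ ys) = backAuxD o lim (backAuxD o lim d ys) xs := by
  induction xs with
  | nil => rfl
  | cons p rest ih => obtain ⟨i, c⟩ := p; simp only [List.cons_append, backAuxD, ih]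

lemma backAuxD_no_match (o : List String) (lim d : Int) (xs : List (Int × Char))
    (h : ∀ p ∈ xs, ¬ p.1 < lim) : backAuxD o lim d xs = d := by
  induction xs with
  | nil => rfl
  | cons p rest ih =>
    obtain ⟨i, c⟩ := p
    have hi : ¬ i < lim := h (i, c) (List.mem_cons_self ..)
    have : backAuxD o lim d ((i, c) :: rest) = backAuxD o lim d rest := by
      simp [backAuxD, decide_eq_false hi]
    rw [this]
    exact ih fun p hp => h p (List.mem_cons_of_mem _ hp)

lemma fwdScanB_skip (full : List String) (k d : Int) (xs ys : List (Int × Char))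
    (h : ∀ p ∈ xs, ¬ k < p.1) : fwdScanB full k d (xs ++ ys) = fwdScanB full k d ys := by
  induction xs with
  | nil => rfl
  | cons p rest ih =>
    obtain ⟨i, c⟩ := p
    have hi : ¬ k < i := h (i, c) (List.mem_cons_self ..)
    have : fwdScanB full k d (((i, c) :: rest) ++ ys) = fwdScanB full k d (rest ++ ys) := by
      simp [fwdScanB, decide_eq_false hi]
    rw [this]
    exact ih fun p hp => h p (List.mem_cons_of_mem _ hp)

lemma scanOperB_none_spec (search : List String) (ps : List (Int × Char))
    (h : scanOperB search ps = none) :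
    ∀ p ∈ ps, (search.contains (String.singleton p.2) && !(p.1 == 0 && p.2 == '-')) = false := by
  induction ps with
  | nil => intro p hp; cases hp
  | cons p rest ih =>
    obtain ⟨i, c⟩ := p
    intro q hq
    by_cases hc : (search.contains (String.singleton c) && !(i == 0 && c == '-')) = true
    · simp only [scanOperB, if_pos hc] at h; cases h
    · simp only [scanOperB, if_neg hc] at h
      rcases List.mem_cons.1 hq with rfl | hq'
      · exact Bool.eq_false_iff.2 hc
      · exact ih h q hq'

lemma scanOperB_some_spec (search : List String) (ps : List (Int × Char)) (k : Int)
    (h : scanOperB search ps = some k) :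
    ∃ pre c suf, ps = pre ++ (k, c) :: suf ∧
      (∀ p ∈ pre, (search.contains (String.singleton p.2) && !(p.1 == 0 && p.2 == '-')) = false) ∧
      (search.contains (String.singleton c) && !(k == 0 && c == '-')) = true := by
  induction ps generalizing k with
  | nil => cases h
  | cons p rest ih =>
    obtain ⟨i, c⟩ := p
    by_cases hc : (search.contains (String.singleton c) && !(i == 0 && c == '-')) = true
    · simp only [scanOperB, if_pos hc] at h
      obtain rfl : i = k := by injection h
      refine ⟨[], c, rest, rfl, ?_, hc⟩
      intro p hp; cases hp
    · simp only [scanOperB, if_neg hc] at h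
      obtain ⟨pre, c', suf, hps, hpre, hcond⟩ := ih k h
      refine ⟨(i, c) :: pre, c', suf, by rw [hps]; rfl, ?_, hcond⟩
      intro q hq
      rcases List.mem_cons.1 hq with rfl | hq'
      · exact Bool.eq_false_iff.2 hc
      · exact hpre q hq'

-- found phase of A's loop = B's forward scan
lemma loopA_found (n k : Int) (search operands full : List String)
    (hsf : ∀ c : Char, search.contains (String.singleton c) = true →
      full.contains (String.singleton c) = true) :
    ∀ (suf : List (Int × Char)) (st fin op : Int), (∀ p ∈ suf, 0 < p.1 ∧ k < p.1) →
      loopA n search operands full suf st fin op true = (st, fwdScanB full k fin suf, op) := by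
  intro suf
  induction suf with
  | nil => intro st fin op _; rfl
  | cons p rest ih =>
    obtain ⟨i, c⟩ := p
    intro st fin op hb
    obtain ⟨hi0, hik⟩ := hb (i, c) (List.mem_cons_self ..)
    have hne : ¬ i = 0 := by omega
    by_cases hfull : full.contains (String.singleton c) = true
    · have hmem : String.singleton c ∈ full := (List.contains_iff_mem).1 hfull
      simp [loopA, fwdScanB, hne, hik, hmem]
    · have hnmem : String.singleton c ∉ full := fun h => hfull (contains_of_mem h)
      have hnse : String.singleton c ∉ search := fun h => hfull (hsf c (contains_of_mem h))
      have hrec := ih st fin op (fun p hp => hb p (List.mem_cons_of_mem _ hp))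
      simp [loopA, fwdScanB, hne, hnmem, hnse, hik, hrec]

-- not-found phase of A's loop threads exactly the backward-scan accumulator
lemma loopA_prefix (n lim : Int) (search full : List String) (others : List String) :
    ∀ (pre rest : List (Int × Char)) (st : Int),
      (∀ p ∈ pre, (search.contains (String.singleton p.2) && !(p.1 == 0 && p.2 == '-')) = false) →
      (∀ p ∈ pre, p.1 < lim) →
      loopA n search others full (pre ++ rest) st 0 0 false =
        loopA n search others full rest (backAuxD others lim st pre.reverse) 0 0 false := by
  intro pre
  induction pre with
  | nil => intro rest st _ _; rfl
  | cons p pre' ih =>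
    obtain ⟨i, c⟩ := p
    intro rest st hns hlt
    have hi : i < lim := hlt (i, c) (List.mem_cons_self ..)
    have hcond := hns (i, c) (List.mem_cons_self ..)
    have hrec := fun st' => ih rest st'
      (fun p hp => hns p (List.mem_cons_of_mem _ hp))
      (fun p hp => hlt p (List.mem_cons_of_mem _ hp))
    rw [List.cons_append, List.reverse_cons, backAuxD_append]
    by_cases hskip : (i == 0 && c == '-') = true
    · obtain ⟨hi0, hc⟩ := Bool.and_eq_true_iff.1 hskip
      have hi0' : i = 0 := by simpa using hi0
      have hc' : c = '-' := by simpa using hc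
      subst hi0'; subst hc'
      have l2 : backAuxD others lim st [((0 : Int), '-')] = st := by simp [backAuxD]
      rw [l2]
      have l1 : loopA n search others full (((0 : Int), '-') :: (pre' ++ rest)) st 0 0 false =
          loopA n search others full (pre' ++ rest) st 0 0 false := by
        simp [loopA]
      rw [l1]; exact hrec st
    · have hskipf : (i == 0 && c == '-') = false := Bool.eq_false_iff.2 hskip
      have hsef : search.contains (String.singleton c) = false := by
        simpa [hskipf] using hcond
      cases hoc : others.contains (String.singleton c) with
      | true =>
        have l2 : backAuxD others lim st [(i, c)] = i + 1 := by
          simp only [backAuxD]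
          rw [hskipf, hoc]
          simp [hi]
        rw [l2]
        have l1 : loopA n search others full ((i, c) :: (pre' ++ rest)) st 0 0 false =
            loopA n search others full (pre' ++ rest) (i + 1) 0 0 false := by
          simp only [loopA]
          rw [hskipf, hoc]
          simp
        rw [l1]; exact hrec (i + 1)
      | false =>
        have l2 : backAuxD others lim st [(i, c)] = st := by
          simp only [backAuxD]
          rw [hoc]
          simp
        rw [l2]
        have l1 : loopA n search others full ((i, c) :: (pre' ++ rest)) st 0 0 false =
            loopA n search others full (pre' ++ rest) st 0 0 false := by
          simp only [loopA]
          rw [hskipf, hoc, hsef]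
          simp
        rw [l1]; exact hrec st

lemma removeAllA_eq_filter :
    ∀ (ys xs : List String), ys.Nodup → xs.Nodup → (∀ y ∈ ys, y ∈ xs) →
      removeAllA xs ys = some (xs.filter (fun x => !(ys.contains x))) := by
  intro ys
  induction ys with
  | nil => intro xs _ _ _; simp [removeAllA]
  | cons y ys ih =>
    intro xs hnd hxnd hsub
    have hy : y ∈ xs := hsub y (List.mem_cons_self ..)
    have hnd' := List.nodup_cons.1 hnd
    simp only [removeAllA, PySem.List.remove?_eq_some_erase xs y hy]
    rw [ih (xs.erase y) hnd'.2 (hxnd.erase y) ?_]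
    · congr 1
      rw [List.Nodup.erase_eq_filter hxnd y, List.filter_filter]
      apply List.filter_congr
      intro x hx
      cases hxy : x == y <;> cases hys : ys.contains x <;>
        simp_all [beq_iff_eq]
    · intro z hz
      have hzx : z ∈ xs := hsub z (List.mem_cons_of_mem _ hz)
      have hzy : z ≠ y := fun h => hnd'.1 (h ▸ hz)
      exact (List.mem_erase_of_ne hzy).2 hzx

-- ===== VERDICT (by name: the statement is the Claim_ definition above) =====
theorem find_spec : Claim_equal_find := by
  intro exp serch_operand _ hpre
  obtain ⟨hnd, hsub⟩ := hpre
  unfold Spec_find find find_alt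
  dsimp only
  have hfullnd : (["*", "/", "-", "+"] : List String).Nodup := by decide
  rw [removeAllA_eq_filter serch_operand ["*", "/", "-", "+"] hnd hfullnd hsub]
  simp only []
  have hn : PySem.Str.len exp = (exp.toList.length : Int) := by
    simp [PySem.Str.len_eq]
  have hmemps : ∀ p ∈ PySem.List.enumerate exp.toList 0, 0 ≤ p.1 ∧ p.1 < PySem.Str.len exp := by
    intro p hp
    rw [PySem.List.mem_enumerate_iff] at hp
    obtain ⟨j, hj, rfl⟩ := hp
    constructor
    · simp
    · rw [hn]; simpa using hj
  have hpw : (PySem.List.enumerate exp.toList 0).Pairwise (fun p q => p.1 < q.1) :=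
    PySem.List.pairwise_lt_enumerate exp.toList 0
  have hsf : ∀ c : Char, serch_operand.contains (String.singleton c) = true →
      (["*", "/", "-", "+"] : List String).contains (String.singleton c) = true := by
    intro c hc
    exact contains_of_mem (hsub _ ((List.contains_iff_mem).1 hc))
  cases hsc : scanOperB serch_operand (PySem.List.enumerate exp.toList 0) with
  | none =>
    have hns := scanOperB_none_spec serch_operand _ hsc
    have := loopA_prefix (PySem.Str.len exp) (PySem.Str.len exp) serch_operand
      ["*", "/", "-", "+"]
      (List.filter (fun op => !serch_operand.contains op) ["*", "/", "-", "+"])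
      (PySem.List.enumerate exp.toList 0) [] 0 hns
      (fun p hp => (hmemps p hp).2)
    rw [List.append_nil] at this
    rw [this, backScanB_eq_auxD]
    rfl
  | some k =>
    dsimp only
    obtain ⟨pre, c, suf, hps, hpre, hcond⟩ := scanOperB_some_spec serch_operand _ k hsc
    rw [hps] at hpw
    obtain ⟨hpw1, hpw2, hcross⟩ := List.pairwise_append.1 hpw
    have hsufgt : ∀ q ∈ suf, k < q.1 := fun q hq => (List.pairwise_cons.1 hpw2).1 q hq
    have hprelt : ∀ p ∈ pre, p.1 < k := fun p hp => hcross p hp (k, c) (List.mem_cons_self ..)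
    have hkmem : ((k, c) : Int × Char) ∈ PySem.List.enumerate exp.toList 0 := by
      rw [hps]; exact List.mem_append_right _ (List.mem_cons_self ..)
    have hk0 : 0 ≤ k := (hmemps _ hkmem).1
    obtain ⟨hsearch, hskip⟩ := Bool.and_eq_true_iff.1 hcond
    have hskip' : (k == 0 && c == '-') = false := by
      cases h : (k == 0 && c == '-')
      · rfl
      · rw [h] at hskip; cases hskip
    have hothers : ((["*", "/", "-", "+"] : List String).filter
        (fun op => !(serch_operand.contains op))).contains (String.singleton c) = false := by
      cases ho : ((["*", "/", "-", "+"] : List String).filter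
          (fun op => !(serch_operand.contains op))).contains (String.singleton c)
      · rfl
      · have := (List.mem_filter.1 ((List.contains_iff_mem).1 ho)).2
        rw [hsearch] at this
        cases this
    rw [hps]
    rw [loopA_prefix (PySem.Str.len exp) k serch_operand ["*", "/", "-", "+"]
      (List.filter (fun op => !serch_operand.contains op) ["*", "/", "-", "+"]) pre _ 0
      hpre hprelt]
    have hstep : loopA (PySem.Str.len exp) serch_operand
        ((["*", "/", "-", "+"] : List String).filter (fun op => !(serch_operand.contains op)))
        ["*", "/", "-", "+"] ((k, c) :: suf)
        (backAuxD ((["*", "/", "-", "+"] : List String).filter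
          (fun op => !(serch_operand.contains op))) k 0 pre.reverse) 0 0 false =
        loopA (PySem.Str.len exp) serch_operand
        ((["*", "/", "-", "+"] : List String).filter (fun op => !(serch_operand.contains op)))
        ["*", "/", "-", "+"] suf
        (backAuxD ((["*", "/", "-", "+"] : List String).filter
          (fun op => !(serch_operand.contains op))) k 0 pre.reverse) (PySem.Str.len exp - 1) k true := by
      simp only [loopA]
      rw [hskip', hothers, hsearch]
      simp
    rw [hstep]
    rw [loopA_found (PySem.Str.len exp) k serch_operand _ _ hsf suf _ _ _
      (fun p hp => ⟨by have := hsufgt p hp; omega, hsufgt p hp⟩)]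
    -- right-hand side
    have hback : backScanB (List.filter (fun op => !serch_operand.contains op) ["*", "/", "-", "+"]) k
        (pre ++ (k, c) :: suf).reverse =
        backAuxD (List.filter (fun op => !serch_operand.contains op) ["*", "/", "-", "+"]) k 0 pre.reverse := by
      rw [backScanB_eq_auxD, List.reverse_append, List.reverse_cons, List.append_assoc,
        backAuxD_append,
        backAuxD_no_match _ _ _ _ (fun p hp => by
          have := hsufgt p (List.mem_reverse.1 hp); omega)]
      simp only [List.singleton_append, backAuxD]
      simp
    have hfwd : fwdScanB ["*", "/", "-", "+"] k (PySem.Str.len exp - 1)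
        (pre ++ (k, c) :: suf) = fwdScanB ["*", "/", "-", "+"] k (PySem.Str.len exp - 1) suf := by
      have hsplit : pre ++ (k, c) :: suf = (pre ++ [(k, c)]) ++ suf := by simp
      rw [hsplit, fwdScanB_skip]
      intro p hp
      rcases List.mem_append.1 hp with hp1 | hp2
      · have := hprelt p hp1; omega
      · obtain rfl := List.mem_singleton.1 hp2
        simp
    rw [hback, hfwd]
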